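-- pv_equiv track=rewrite | github.com/cscheid/advent-of-code-2018 | 2/main.py | count
-- ===== SOURCE A (Python) =====
-- def histogram(w):
--     result = {}
--     for l in w:
--         result[l] = result.get(l, 0) + 1
--     inv = {}
--     for (k, v) in result.items():
--         inv.setdefault(v, []).append(k)
--     return inv
--
-- def count(ws):
--     v2 = 0
--     v3 = 0
--     for w in ws:
--         h = histogram(w)
--         if len(h.get(2, [])) > 0:
--             v2 += 1
--         if len(h.get(3, [])) > 0:
--             v3 += 1
--     return v2 * v3
-- ===== SOURCE B (Python) =====
-- def _has_rep(w, n):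
--     return any(w.count(c) == n for c in w)
--
-- def count(ws):
--     v2 = 0
--     v3 = 0
--     for w in ws:
--         if _has_rep(w, 2):
--             v2 += 1
--         if _has_rep(w, 3):
--             v3 += 1
--     return v2 * v3
-- ===== Notes on version B (the rewrite author's own statement) =====
-- stated objective: simpler
-- what changed: B removes A's histogram dict and inverted {frequency: letters} map entirely: per word it asks directly whether some character occurs exactly 2 (resp. 3) times via w.count.
import Mathlib
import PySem

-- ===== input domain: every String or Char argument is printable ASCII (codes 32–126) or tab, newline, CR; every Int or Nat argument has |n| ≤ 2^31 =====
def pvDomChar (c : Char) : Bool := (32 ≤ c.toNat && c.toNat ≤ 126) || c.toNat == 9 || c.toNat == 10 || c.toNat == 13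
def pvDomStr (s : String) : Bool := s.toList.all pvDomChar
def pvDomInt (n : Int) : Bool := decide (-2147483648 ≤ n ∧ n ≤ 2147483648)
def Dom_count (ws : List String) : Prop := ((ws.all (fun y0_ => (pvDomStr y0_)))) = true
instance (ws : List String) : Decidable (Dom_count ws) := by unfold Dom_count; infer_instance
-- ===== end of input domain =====

-- B replaces A's histogram dict + inverted {frequency: letters} map with direct
-- "some character occurs exactly n times" queries (simpler; no dicts at all).

-- ===== PORT A =====
def histogram (w : String) : PySem.Dict Int (List Char) :=
  let result : PySem.Dict Char Int :=
    w.toList.foldl (fun d l => d.insert l (d.getD l 0 + 1)) PySem.Dict.empty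
  result.items.foldl (fun inv p => inv.modify p.2 [] (· ++ [p.1])) PySem.Dict.empty

def count (ws : List String) : Int :=
  let r := ws.foldl (fun (vp : Int × Int) w =>
    let h := histogram w
    ((if ((h.getD 2 []).length > 0) then vp.1 + 1 else vp.1),
     (if ((h.getD 3 []).length > 0) then vp.2 + 1 else vp.2))) (0, 0)
  r.1 * r.2

-- ===== PORT B =====
def hasRep (w : String) (n : Int) : Bool :=
  w.toList.any (fun c => (w.toList.count c : Int) == n)

def count_alt (ws : List String) : Int :=
  let r := ws.foldl (fun (vp : Int × Int) w =>
    ((if hasRep w 2 then vp.1 + 1 else vp.1),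
     (if hasRep w 3 then vp.2 + 1 else vp.2))) (0, 0)
  r.1 * r.2

-- ===== PRECONDITION & SPEC =====
def Spec_count (ws : List String) (out : Int) : Prop := out = count_alt ws
instance (ws : List String) (out : Int) : Decidable (Spec_count ws out) := by unfold Spec_count; infer_instance

-- ===== CLAIM (what is proved, stated in full; the proofs are below) =====
def Claim_equal_count : Prop := ∀ (ws : List String), Dom_count ws → Spec_count ws (count ws)

-- ===== LEMMAS AND PROOFS =====

lemma grp (l : List (Char × Int)) (n : Int) :
    ((l.foldl (fun d p => d.modify p.2 [] (· ++ [p.1]))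
        (PySem.Dict.empty : PySem.Dict Int (List Char))).getD n [])
      = (l.filter (fun p => p.2 == n)).map (·.1) := by
  have h := PySem.Dict.getD_foldl_modify_append (l := l.map Prod.swap)
    (d := (PySem.Dict.empty : PySem.Dict Int (List Char))) (c := n)
  rw [List.foldl_map] at h
  simpa [List.filter_map, List.map_map, Function.comp, Prod.swap] using h

lemma histogram_getD (w : String) (n : Int) :
    (histogram w).getD n [] =
      (((PySem.Set.ofList w.toList).map (fun k => (k, (w.toList.count k : Int)))).filter
        (fun p => p.2 == n)).map (·.1) := by
  unfold histogram
  have hres : w.toList.foldl (fun d l => d.insert l (d.getD l 0 + 1)) PySem.Dict.empty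
      = PySem.Dict.counter w.toList :=
    PySem.Dict.foldl_insert_getD_add_one_eq_counter w.toList
  simp only [hres, PySem.Dict.items_counter]
  exact grp _ n

lemma histogram_pos_iff (w : String) (n : Int) :
    ((histogram w).getD n []).length > 0 ↔ hasRep w n = true := by
  rw [histogram_getD]
  simp [hasRep, List.length_pos_iff, List.any_eq_true, List.filter_map,
        List.filter_eq_nil_iff, PySem.Set.mem_ofList]

lemma step_eq (w : String) (vp : Int × Int) :
    (let h := histogram w
     ((if ((h.getD 2 []).length > 0) then vp.1 + 1 else vp.1),
      (if ((h.getD 3 []).length > 0) then vp.2 + 1 else vp.2)))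
    = ((if hasRep w 2 then vp.1 + 1 else vp.1),
       (if hasRep w 3 then vp.2 + 1 else vp.2)) := by
  have h2 := histogram_pos_iff w 2
  have h3 := histogram_pos_iff w 3
  simp only []
  congr 1
  · by_cases hb : hasRep w 2 = true
    · simp [hb, h2.mpr hb]
    · have : ¬ ((histogram w).getD 2 []).length > 0 := fun h => hb (h2.mp h)
      simp [this, hb]
  · by_cases hb : hasRep w 3 = true
    · simp [hb, h3.mpr hb]
    · have : ¬ ((histogram w).getD 3 []).length > 0 := fun h => hb (h3.mp h)
      simp [this, hb]

-- ===== VERDICT (by name: the statement is the Claim_ definition above) =====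
theorem count_spec : Claim_equal_count := by
  intro ws _
  unfold Spec_count count count_alt
  exact congrArg (fun r : Int × Int => r.1 * r.2)
    (PySem.List.foldl_congr_mem ws _ _ (0, 0) (fun acc x _ => step_eq x acc))
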